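-- pv_equiv track=rewrite | github.com/Melania227/University-SemesterVI-GregorianCalendar | main-1b.py | imprimirMes
-- ===== SOURCE A (Python) =====
-- dias_mes = [31, [28, 29], 31, 30, 31, 30, 31, 31, 30, 31, 30, 31]
--
-- dias_calendario = '  D  L  K  M  J  V  S |'
--
-- meses = ['Enero', 'Febrero', 'Marzo', 'Abril', 'Mayo', 'Junio', 'Julio', 'Agosto', 'Setiembre', 'Octubre', 'Noviembre', 'Diciembre']
--
-- def imprimirMes(inicio, mes, bis):
--     matriz = []
--     matriz.append(nombre_mes(mes))
--     matriz.append(dias_calendario)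
--     cont = 1
--     max = dias_mes[1][bis] if mes == 1 else dias_mes[mes]
--     for i in range(2,8):
--         linea = ''  if i != 2 else ('   '*(inicio))
--         for dia in range(inicio,7):
--             if cont <= max:
--                 if cont==max:
--                     final = dia
--
--                 linea+= '  '  if (cont < 10 ) else  ' '
--                 linea+= str(cont)
--                 cont+=1
--         if cont>max:
--             matriz.append(linea+ (' '*(22 -len(linea)))+'|')
--         else:
--             matriz.append(linea+' |')
--         inicio = 0
--     return [matriz, final]
--
-- def nombre_mes(mes):
--     m_l = len(meses[mes])
--     linea = (' '*(11 - m_l//2) )+ meses[mes]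
--     linea = linea + (' '*(22 -len(linea)))+'|'
--     return linea
-- ===== SOURCE B (Python) =====
-- dias_mes = [31, [28, 29], 31, 30, 31, 30, 31, 31, 30, 31, 30, 31]
--
-- dias_calendario = '  D  L  K  M  J  V  S |'
--
-- meses = ['Enero', 'Febrero', 'Marzo', 'Abril', 'Mayo', 'Junio', 'Julio', 'Agosto', 'Setiembre', 'Octubre', 'Noviembre', 'Diciembre']
--
-- def nombre_mes(mes):
--     m_l = len(meses[mes])
--     linea = (' '*(11 - m_l//2) )+ meses[mes]
--     linea = linea + (' '*(22 -len(linea)))+'|'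
--     return linea
--
-- def imprimirMes(inicio, mes, bis):
--     mx = dias_mes[1][bis] if mes == 1 else dias_mes[mes]
--     t1 = max(0, 7 - inicio)  # number of day cells in the first week row
--     tokens = [('  ' if d < 10 else ' ') + str(d) for d in range(1, mx + 1)]
--     matriz = [nombre_mes(mes), dias_calendario]
--     for w in range(6):
--         lo, hi = (0, t1) if w == 0 else (t1 + 7 * (w - 1), t1 + 7 * w)
--         row = ('   ' * inicio if w == 0 else '') + ''.join(tokens[lo:hi])
--         if hi >= mx:  # month complete by the end of this row: pad to width 22
--             matriz.append(row + ' ' * (22 - len(row)) + '|')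
--         else:
--             matriz.append(row + ' |')
--     final = inicio + mx - 1 if mx <= 7 - inicio else (mx - t1 - 1) % 7
--     return [matriz, final]
-- ===== Notes on version B (the rewrite author's own statement) =====
-- stated objective: simpler
-- what changed: Replaces the nested mutable week loop (cont/final/linea state, inicio reset) by a flat list of 3-char day tokens sliced into six row windows, with the final weekday column computed in closed form as (mx - t1 - 1) % 7 instead of being captured inside the loop.
import Mathlib
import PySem

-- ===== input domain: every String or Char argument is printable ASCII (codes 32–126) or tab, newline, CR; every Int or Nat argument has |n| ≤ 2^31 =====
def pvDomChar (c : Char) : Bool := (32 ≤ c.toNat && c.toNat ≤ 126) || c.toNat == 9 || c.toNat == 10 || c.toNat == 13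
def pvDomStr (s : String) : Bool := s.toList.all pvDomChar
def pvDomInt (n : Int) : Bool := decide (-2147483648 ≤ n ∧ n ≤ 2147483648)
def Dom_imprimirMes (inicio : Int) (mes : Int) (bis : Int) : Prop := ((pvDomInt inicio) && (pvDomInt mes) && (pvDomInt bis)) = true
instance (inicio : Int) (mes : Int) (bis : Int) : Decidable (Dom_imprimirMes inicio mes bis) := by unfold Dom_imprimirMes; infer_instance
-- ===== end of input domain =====

-- B replaces A's nested mutable week loop by a flat day-token list sliced into row windows with a
-- closed-form final column ((mx - t1 - 1) % 7); objective: simpler, same cost.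


-- ===== PORT A =====
-- module constants; dias_mes is heterogeneous in Python (a list at index 1): index 1 carries a
-- dummy 0 here — under Pre_ (mes ≠ 1 and mes ≠ -11 in the else branch) it is never read.
def pvDiasMes : List Int := [31, 0, 31, 30, 31, 30, 31, 31, 30, 31, 30, 31]
def pvDiasCal : List Char := "  D  L  K  M  J  V  S |".toList
def pvMeses : List String := ["Enero", "Febrero", "Marzo", "Abril", "Mayo", "Junio", "Julio", "Agosto", "Setiembre", "Octubre", "Noviembre", "Diciembre"]

-- nombre_mes (shared module helper, called unchanged by both A and B)
def nombreMes (mes : Int) : List Char :=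
  let nom := ((PySem.List.pyGet? pvMeses mes).getD "").toList
  let linea := PySem.List.pyRepeat [' '] (11 - PySem.Int.floordiv (nom.length : Int) 2) ++ nom
  linea ++ PySem.List.pyRepeat [' '] (22 - (linea.length : Int)) ++ ['|']

-- max = dias_mes[1][bis] if mes == 1 else dias_mes[mes]  (identical expression in A and B)
def pvMax (mes : Int) (bis : Int) : Int :=
  if mes = 1 then (PySem.List.pyGet? [(28 : Int), 29] bis).getD 0 else (PySem.List.pyGet? pvDiasMes mes).getD 0

-- the day cell: '  '+str(d) if d < 10 else ' '+str(d)  (identical expression in A and B)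
def pvTok (d : Int) : List Char := (if d < 10 then [' ', ' '] else [' ']) ++ PySem.Int.toChars d

-- A's inner loop body (for dia in range(inicio,7)); state (linea, cont, final)
def pvStepDia (mx : Int) (s : List Char × Int × Option Int) (dia : Int) : List Char × Int × Option Int :=
  if s.2.1 ≤ mx then
    (s.1 ++ pvTok s.2.1, s.2.1 + 1, if s.2.1 = mx then some dia else s.2.2)
  else s

-- A's outer loop body (for i in range(2,8)); state (appended week rows, cont, final, inicio)
def pvStepSem (mx : Int) (st : List (List Char) × Int × Option Int × Int) (i : Int) :
    List (List Char) × Int × Option Int × Int :=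
  let linea0 : List Char := if i ≠ 2 then [] else PySem.List.pyRepeat "   ".toList st.2.2.2
  let s := (PySem.List.pyRange st.2.2.2 7).foldl (pvStepDia mx) (linea0, st.2.1, st.2.2.1)
  (st.1 ++ [if s.2.1 > mx
            then s.1 ++ PySem.List.pyRepeat [' '] (22 - (s.1.length : Int)) ++ ['|']
            else s.1 ++ [' ', '|']],
   s.2.1, s.2.2, 0)

-- the week rows appended after the two header rows, and final (none = never assigned)
def pvSemanasA (inicio : Int) (mx : Int) : List (List Char) × Option Int :=
  let st := (PySem.List.pyRange 2 8).foldl (pvStepSem mx) ([], 1, none, inicio)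
  (st.1, st.2.2.1)

-- the Python returns [matriz, final]; final is unbound only outside Pre_ (there .getD 0 stands in)
def imprimirMes (inicio : Int) (mes : Int) (bis : Int) : List String × Int :=
  let mx := pvMax mes bis
  let st := pvSemanasA inicio mx
  (([nombreMes mes, pvDiasCal] ++ st.1).map String.ofList, st.2.getD 0)

-- ===== PORT B =====
-- row w of B: the first row takes cells tokens[0:t1] behind the '   '*inicio lead-in, row w ≥ 1
-- takes tokens[t1+7(w-1) : t1+7w]; a row by whose end the month is complete is padded to 22,
-- an earlier (necessarily 21-char) row is closed with ' |'
def pvRowB (inicio mx t1 : Int) (tokens : List (List Char)) (w : Int) : List Char :=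
  let lo : Int := if w = 0 then 0 else t1 + 7 * (w - 1)
  let hi : Int := if w = 0 then t1 else t1 + 7 * w
  let row := (if w = 0 then PySem.List.pyRepeat "   ".toList inicio else []) ++
             PySem.Chars.join [] (PySem.List.slice tokens (some lo) (some hi))
  if hi ≥ mx then row ++ PySem.List.pyRepeat [' '] (22 - (row.length : Int)) ++ ['|']
  else row ++ [' ', '|']

def pvSemanasB (inicio : Int) (mx : Int) : List (List Char) :=
  let t1 : Int := max 0 (7 - inicio)
  let tokens := (PySem.List.pyRange 1 (mx + 1)).map pvTok
  (PySem.List.pyRange 0 6).foldl (fun m w => m ++ [pvRowB inicio mx t1 tokens w]) []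

-- final = inicio + mx - 1 if mx <= 7 - inicio else (mx - t1 - 1) % 7
def pvFinalB (inicio : Int) (mx : Int) : Int :=
  if mx ≤ 7 - inicio then inicio + mx - 1 else PySem.Int.mod (mx - max 0 (7 - inicio) - 1) 7

def imprimirMes_alt (inicio : Int) (mes : Int) (bis : Int) : List String × Int :=
  let mx := pvMax mes bis
  (([nombreMes mes, pvDiasCal] ++ pvSemanasB inicio mx).map String.ofList, pvFinalB inicio mx)

-- ===== PRECONDITION & SPEC =====
-- Pre_ excludes exactly the inputs where A raises: IndexError for mes outside -12..11 (and, for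
-- February, bis outside -2..1), and TypeError for mes = -11, where dias_mes[-11] is the inner
-- [28, 29] list and 'cont <= max' compares int with list.
def Pre_imprimirMes (inicio : Int) (mes : Int) (bis : Int) : Prop :=
  -12 ≤ mes ∧ mes < 12 ∧ mes ≠ -11 ∧ (mes = 1 → -2 ≤ bis ∧ bis < 2)
instance (inicio : Int) (mes : Int) (bis : Int) : Decidable (Pre_imprimirMes inicio mes bis) := by unfold Pre_imprimirMes; infer_instance

def pvWitness_imprimirMes : Int × Int × Int := (3, 1, 1)

def Spec_imprimirMes (inicio : Int) (mes : Int) (bis : Int) (out : List String × Int) : Prop := out = imprimirMes_alt inicio mes bis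
instance (inicio : Int) (mes : Int) (bis : Int) (out : List String × Int) : Decidable (Spec_imprimirMes inicio mes bis out) := by unfold Spec_imprimirMes; infer_instance

-- ===== CLAIM (what is proved, stated in full; the proofs are below) =====
def Claim_equal_imprimirMes : Prop := ∀ (inicio : Int) (mes : Int) (bis : Int), Dom_imprimirMes inicio mes bis → Pre_imprimirMes inicio mes bis → Spec_imprimirMes inicio mes bis (imprimirMes inicio mes bis)

-- ===== LEMMAS AND PROOFS =====

-- the all-blank padded row '                      |'
def pvPadRow : List Char := PySem.List.pyRepeat [' '] 22 ++ ['|']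

lemma pyRepeat_of_nonpos {α : Type} (xs : List α) (n : Int) (h : n ≤ 0) :
    PySem.List.pyRepeat xs n = [] := by
  simp [PySem.List.pyRepeat, Int.toNat_of_nonpos h]

lemma slice_all {α : Type} (xs : List α) (b : Int) (hb : (xs.length : Int) ≤ b) :
    PySem.List.slice xs (some 0) (some b) = xs := by
  have hb0 : ¬ b < 0 := by omega
  have h1 : PySem.List.clampIdx xs.length b = xs.length := by
    unfold PySem.List.clampIdx
    rw [if_neg hb0]
    exact Nat.min_eq_right (by omega)
  have h0 : PySem.List.clampIdx xs.length 0 = 0 := by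
    unfold PySem.List.clampIdx; simp
  simp [PySem.List.slice, h0, h1]

lemma slice_empty {α : Type} (xs : List α) (a b : Int) (ha : (xs.length : Int) ≤ a) :
    PySem.List.slice xs (some a) (some b) = [] := by
  have ha0 : ¬ a < 0 := by omega
  have h1 : PySem.List.clampIdx xs.length a = xs.length := by
    unfold PySem.List.clampIdx
    rw [if_neg ha0]
    exact Nat.min_eq_right (by omega)
  simp [PySem.List.slice, h1, List.drop_length]

-- once cont has passed mx the inner loop is the identity
lemma dia_noop (mx : Int) (L : List Int) (s : List Char × Int × Option Int) (h : mx < s.2.1) :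
    L.foldl (pvStepDia mx) s = s := by
  induction L with
  | nil => rfl
  | cons x t ih => simp [List.foldl_cons, pvStepDia, not_le.mpr h, ih]

-- a run of exactly the remaining n days: appends their tokens, sets final on the last one
lemma dia_run (mx : Int) (n : Nat) (hn : 0 < n) (hc : (n : Int) ≤ mx) :
    ∀ (a : Int) (linea : List Char) (f : Option Int),
    (PySem.List.pyRange a (a + n)).foldl (pvStepDia mx) (linea, mx + 1 - n, f) =
      (linea ++ ((PySem.List.pyRange (mx + 1 - n) (mx + 1)).map pvTok).flatten, mx + 1,
       some (a + n - 1)) := by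
  induction n with
  | zero => omega
  | succ m ih =>
    intro a linea f
    rw [PySem.List.pyRange_one_cons (by push_cast; omega)]
    simp only [List.foldl_cons]
    have hstep : pvStepDia mx (linea, mx + 1 - ((m : Int) + 1), f) a =
        (linea ++ pvTok (mx + 1 - ((m : Int) + 1)), mx + 1 - ((m : Int) + 1) + 1,
         if mx + 1 - ((m : Int) + 1) = mx then some a else f) := by
      simp [pvStepDia, show mx + 1 - ((m : Int) + 1) ≤ mx by omega]
    push_cast
    push_cast at hstep
    rw [hstep]
    rcases Nat.eq_zero_or_pos m with hm | hm
    · subst hm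
      simp only [Nat.cast_zero]
      rw [show a + (0 + 1) = a + 1 by ring, show mx + 1 - (0 + 1) + 1 = mx + 1 by ring]
      rw [PySem.List.pyRange_one_eq_nil (by omega : a + 1 ≤ a + 1)]
      rw [PySem.List.pyRange_one_cons (by omega : mx + 1 - (0 + 1) < mx + 1)]
      rw [show mx + 1 - (0 + 1) + 1 = mx + 1 by ring]
      rw [PySem.List.pyRange_one_eq_nil (le_refl (mx + 1))]
      simp [show mx + 1 - ((0 : Int) + 1) = mx by ring]
    · have hne : ¬ (mx + 1 - ((m : Int) + 1) = mx) := by omega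
      rw [if_neg hne]
      have harr : a + ((m : Int) + 1) = (a + 1) + (m : Int) := by ring
      rw [harr]
      have harr2 : mx + 1 - ((m : Int) + 1) + 1 = mx + 1 - (m : Int) := by ring
      rw [harr2]
      have := ih hm (by omega) (a + 1) (linea ++ pvTok (mx + 1 - ((m : Int) + 1))) f
      push_cast at this
      rw [this]
      rw [PySem.List.pyRange_one_cons (by omega : mx + 1 - ((m : Int) + 1) < mx + 1)]
      simp only [List.map_cons, List.flatten_cons, List.append_assoc]
      rw [harr2]

-- after the month is complete every remaining week row is the blank padded row
lemma sem_noop (mx : Int) (L : List Int) (h2 : ∀ i ∈ L, i ≠ 2) :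
    ∀ (m : List (List Char)) (c : Int) (f : Option Int), mx < c →
    L.foldl (pvStepSem mx) (m, c, f, 0) = (m ++ List.replicate L.length pvPadRow, c, f, 0) := by
  induction L with
  | nil => intro m c f hc; simp
  | cons x t ih =>
    intro m c f hc
    simp only [List.foldl_cons]
    have hx : pvStepSem mx (m, c, f, 0) x = (m ++ [pvPadRow], c, f, 0) := by
      simp only [pvStepSem]
      rw [if_pos (h2 x (by simp))]
      rw [dia_noop mx _ _ (by simpa using hc)]
      simp [gt_iff_lt, hc, pvPadRow]
    rw [hx, ih (fun i hi => h2 i (by simp [hi])) _ _ _ hc]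
    simp [List.replicate_succ]

-- the outer loop only appends to matriz: the accumulated rows factor out
lemma sem_append (mx : Int) (L : List Int) :
    ∀ (m : List (List Char)) (c : Int) (f : Option Int) (ini : Int),
    L.foldl (pvStepSem mx) (m, c, f, ini) =
      (m ++ (L.foldl (pvStepSem mx) ([], c, f, ini)).1,
       (L.foldl (pvStepSem mx) ([], c, f, ini)).2) := by
  induction L with
  | nil => intro m c f ini; simp
  | cons x t ih =>
    intro m c f ini
    simp only [List.foldl_cons]
    have hx : ∀ m' : List (List Char), pvStepSem mx (m', c, f, ini) x =
        (m' ++ (pvStepSem mx ([], c, f, ini) x).1, (pvStepSem mx ([], c, f, ini) x).2) := by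
      intro m'; simp [pvStepSem]
    rcases hP : pvStepSem mx ([], c, f, ini) x with ⟨r, s1, s2, s3⟩
    rw [hx m, hx [], hP]
    simp only [List.nil_append]
    rw [ih (m ++ r) s1 s2 s3, ih r s1 s2 s3]
    simp [List.append_assoc]

-- B's fold is a map
lemma semB_map (inicio mx : Int) :
    pvSemanasB inicio mx = (PySem.List.pyRange 0 6).map
      (pvRowB inicio mx (max 0 (7 - inicio)) ((PySem.List.pyRange 1 (mx + 1)).map pvTok)) := by
  unfold pvSemanasB
  rw [PySem.List.foldl_append_singleton_eq_map]
  simp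

-- B's row w ≥ 1 is blank-padded once the slice window starts past the month's tokens
lemma rowB_done (inicio mx t1 : Int) (tokens : List (List Char)) (w : Int)
    (hw : 1 ≤ w) (ht : (tokens.length : Int) ≤ t1) (hm : mx ≤ t1) :
    pvRowB inicio mx t1 tokens w = pvPadRow := by
  have hwne : ¬ (w = 0) := by omega
  simp only [pvRowB, if_neg hwne]
  rw [slice_empty tokens _ _ (by nlinarith), PySem.Chars.join_nil]
  rw [if_pos (by nlinarith : t1 + 7 * w ≥ mx)]
  simp [pvPadRow]

-- ''.join on the empty separator is flatten
lemma join_nil_flatten (l : List (List Char)) : PySem.Chars.join [] l = l.flatten := by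
  unfold PySem.Chars.join
  induction l with
  | nil => rfl
  | cons x t ih => cases t <;> simp_all [List.intercalate, List.intersperse]

lemma slice_none_zero {α : Type} (xs : List α) : PySem.List.slice xs none (some 0) = [] := by
  simp [PySem.List.slice]

-- the lead-in prefix only matters in row 0
lemma rowB_ne0 (inicio inicio' mx t1 : Int) (tokens : List (List Char)) (w : Int) (hw : w ≠ 0) :
    pvRowB inicio mx t1 tokens w = pvRowB inicio' mx t1 tokens w := by
  simp [pvRowB, hw]

lemma rowB_zero_t1zero (inicio mx : Int) (tokens : List (List Char)) (hm : 0 < mx) :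
    pvRowB inicio mx 0 tokens 0 = PySem.List.pyRepeat "   ".toList inicio ++ [' ', '|'] := by
  simp [pvRowB, slice_none_zero, PySem.Chars.join_nil, show ¬ ((0 : Int) ≥ mx) by omega]

-- start column ≥ 7: the first week row is the bare lead-in, days start in week 2
lemma semanas_high (inicio mx : Int) (hmx : mx = 28 ∨ mx = 29 ∨ mx = 30 ∨ mx = 31)
    (h7 : 7 ≤ inicio) :
    pvSemanasA inicio mx = (pvSemanasB inicio mx, some (pvFinalB inicio mx)) := by
  have hm28 : 28 ≤ mx := by rcases hmx with rfl | rfl | rfl | rfl <;> norm_num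
  have ht1 : max (0 : Int) (7 - inicio) = 0 := by omega
  unfold pvSemanasA
  rw [show PySem.List.pyRange 2 8 = [2, 3, 4, 5, 6, 7] from by decide]
  rw [List.foldl_cons]
  have hstep : pvStepSem mx ([], 1, none, inicio) 2 =
      ([PySem.List.pyRepeat "   ".toList inicio ++ [' ', '|']], (1 : Int), (none : Option Int), (0 : Int)) := by
    unfold pvStepSem
    rw [PySem.List.pyRange_one_eq_nil (by omega)]
    simp only [List.foldl_nil]
    simp [show ¬ ((1 : Int) > mx) by omega]
  rw [hstep, sem_append]
  rw [semB_map, ht1]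
  rw [show PySem.List.pyRange 0 6 = [0, 1, 2, 3, 4, 5] from by decide]
  simp only [List.map_cons, List.map_nil]
  rw [rowB_zero_t1zero inicio mx _ (by omega)]
  rw [rowB_ne0 inicio 0 mx 0 _ 1 (by norm_num), rowB_ne0 inicio 0 mx 0 _ 2 (by norm_num),
      rowB_ne0 inicio 0 mx 0 _ 3 (by norm_num), rowB_ne0 inicio 0 mx 0 _ 4 (by norm_num),
      rowB_ne0 inicio 0 mx 0 _ 5 (by norm_num)]
  unfold pvFinalB
  rw [if_neg (by omega), ht1]
  rcases hmx with rfl | rfl | rfl | rfl <;>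
    simp only [List.singleton_append, Prod.mk.injEq, List.cons.injEq] <;>
    refine ⟨⟨trivial, ?_⟩, ?_⟩ <;> decide

-- start column below 7 - mx: the whole month is crammed into the first week row
lemma semanas_low (inicio mx : Int) (hmx : mx = 28 ∨ mx = 29 ∨ mx = 30 ∨ mx = 31)
    (hlow : inicio < 7 - mx) :
    pvSemanasA inicio mx = (pvSemanasB inicio mx, some (pvFinalB inicio mx)) := by
  have hm28 : 28 ≤ mx := by rcases hmx with rfl | rfl | rfl | rfl <;> norm_num
  have hcast : ((mx.toNat : Int)) = mx := Int.toNat_of_nonneg (by omega)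
  have hrun := dia_run mx mx.toNat (by omega) (by omega) inicio [] none
  rw [hcast] at hrun
  norm_num at hrun
  unfold pvSemanasA
  rw [show PySem.List.pyRange 2 8 = [2, 3, 4, 5, 6, 7] from by decide]
  rw [List.foldl_cons]
  have hstep : pvStepSem mx ([], 1, none, inicio) 2 =
      ([((PySem.List.pyRange 1 (mx + 1)).map pvTok).flatten ++
          PySem.List.pyRepeat [' '] (22 - ((((PySem.List.pyRange 1 (mx + 1)).map pvTok).flatten).length : Int)) ++ ['|']],
        mx + 1, some (inicio + mx - 1), (0 : Int)) := by
    simp only [pvStepSem]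
    rw [if_neg (show ¬ ((2 : Int) ≠ 2) by norm_num)]
    rw [pyRepeat_of_nonpos _ _ (by omega)]
    rw [PySem.List.pyRange_one_append inicio (inicio + mx) 7 (by omega) (by omega), List.foldl_append]
    rw [hrun]
    rw [dia_noop mx _ _ (by simp)]
    simp [show mx + 1 > mx by omega]
  rw [hstep]
  rw [sem_noop mx [3, 4, 5, 6, 7] (by decide) _ _ _ (by omega)]
  have ht1 : max (0 : Int) (7 - inicio) = 7 - inicio := by omega
  rw [semB_map, ht1]
  rw [show PySem.List.pyRange 0 6 = [0, 1, 2, 3, 4, 5] from by decide]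
  simp only [List.map_cons, List.map_nil]
  have hlen : ((((PySem.List.pyRange 1 (mx + 1)).map pvTok)).length : Int) = mx := by
    simp [PySem.List.length_pyRange_one]
    omega
  have hrow0 : pvRowB inicio mx (7 - inicio) ((PySem.List.pyRange 1 (mx + 1)).map pvTok) 0 =
      ((PySem.List.pyRange 1 (mx + 1)).map pvTok).flatten ++
        PySem.List.pyRepeat [' '] (22 - ((((PySem.List.pyRange 1 (mx + 1)).map pvTok).flatten).length : Int)) ++ ['|'] := by
    simp only [pvRowB, ite_true]
    rw [slice_all _ _ (by omega), join_nil_flatten]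
    rw [pyRepeat_of_nonpos _ _ (by omega), List.nil_append]
    rw [if_pos (by omega)]
  rw [hrow0]
  have hdone : ∀ w : Int, w ≠ 0 → 1 ≤ w →
      pvRowB inicio mx (7 - inicio) ((PySem.List.pyRange 1 (mx + 1)).map pvTok) w = pvPadRow := by
    intro w _ hw1
    exact rowB_done inicio mx _ _ w hw1 (by omega) (by omega)
  rw [hdone 1 (by norm_num) (by norm_num), hdone 2 (by norm_num) (by norm_num),
      hdone 3 (by norm_num) (by norm_num), hdone 4 (by norm_num) (by norm_num),
      hdone 5 (by norm_num) (by norm_num)]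
  unfold pvFinalB
  rw [if_pos (by omega)]
  simp [List.replicate]

-- core equivalence of the week constructions, for every start column
set_option maxRecDepth 200000 in
set_option maxHeartbeats 4000000 in
lemma semanas_eq (inicio mx : Int)
    (hmx : mx = 28 ∨ mx = 29 ∨ mx = 30 ∨ mx = 31) :
    pvSemanasA inicio mx = (pvSemanasB inicio mx, some (pvFinalB inicio mx)) := by
  rcases le_or_gt 7 inicio with h7 | h7
  · exact semanas_high inicio mx hmx h7
  · rcases le_or_gt (7 - mx) inicio with hmid | hlow
    · rcases hmx with rfl | rfl | rfl | rfl <;> interval_cases inicio <;> decide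
    · exact semanas_low inicio mx hmx hlow

lemma pvMax_bounds (mes bis : Int) (hp : Pre_imprimirMes 0 mes bis) :
    pvMax mes bis = 28 ∨ pvMax mes bis = 29 ∨ pvMax mes bis = 30 ∨ pvMax mes bis = 31 := by
  obtain ⟨h1, h2, h3, h4⟩ := hp
  by_cases hm : mes = 1
  · obtain ⟨hb1, hb2⟩ := h4 hm
    subst hm
    interval_cases bis <;> simp [pvMax] <;> decide
  · have : pvMax mes bis = (PySem.List.pyGet? pvDiasMes mes).getD 0 := by
      simp [pvMax, hm]
    rw [this]
    interval_cases mes <;> simp_all <;> decide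

-- ===== VERDICT (by name: the statement is the Claim_ definition above) =====
theorem imprimirMes_spec : Claim_equal_imprimirMes := by
  intro inicio mes bis _ hp
  unfold Spec_imprimirMes imprimirMes imprimirMes_alt
  have hmx := pvMax_bounds mes bis hp
  have h := semanas_eq inicio (pvMax mes bis) hmx
  simp only [h, Option.getD_some]
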